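-- pv_equiv track=rewrite | github.com/QuantConnect/Lean | PythonToolbox/quantconnect/LeanReportCreator.py | get_image_from_dict
-- ===== SOURCE A (Python) =====
-- def get_image_from_dict(dict):
--         ret = '''<div class="content">'''
--         titles = list(dict.keys())
--         stop = min(15, len(titles))
--
--         for i in range(0, stop, 3):
--             ret += '''<div class="container-row">'''
--             for j in range(0, 3):
--                 if i + j >= stop: break
--                 elif titles:
--                     ret += dict.pop(titles[i+j])
--             ret += '''</div>'''
--
--         return ret + '''</div>'''
-- ===== SOURCE B (Python) =====
-- def get_image_from_dict(dict):
--     cells = list(dict.values())[:15]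
--     for key in list(dict)[:len(cells)]:
--         del dict[key]
--     rows = [''.join(cells[i:i + 3]) for i in range(0, len(cells), 3)]
--     return ('<div class="content">'
--             + ''.join('<div class="container-row">' + row + '</div>' for row in rows)
--             + '</div>')
-- ===== Notes on version B (the rewrite author's own statement) =====
-- stated objective: simpler
-- what changed: A interleaves building the HTML with a nested step-3 index loop, an inner break and dict.pop inside the loop; B first collects the first min(15, len) values as a list, then emits one container-row per chunk of three with slices and joins (and deletes the same consumed keys).
import Mathlib
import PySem

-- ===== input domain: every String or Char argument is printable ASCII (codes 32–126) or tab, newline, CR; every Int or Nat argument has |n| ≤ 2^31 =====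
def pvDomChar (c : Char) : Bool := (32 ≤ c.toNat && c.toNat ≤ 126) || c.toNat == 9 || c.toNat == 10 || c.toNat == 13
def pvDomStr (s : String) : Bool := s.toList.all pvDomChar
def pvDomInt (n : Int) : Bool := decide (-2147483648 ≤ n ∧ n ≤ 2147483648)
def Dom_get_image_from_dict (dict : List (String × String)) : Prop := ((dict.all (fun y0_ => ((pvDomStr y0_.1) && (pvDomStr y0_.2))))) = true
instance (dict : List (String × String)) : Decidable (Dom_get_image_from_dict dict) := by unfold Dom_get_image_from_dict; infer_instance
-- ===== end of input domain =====

-- B replaces A's nested step-3 index loop (with in-loop popping and a break) by a single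
-- collect-then-chunk pass: take the first 15 values, emit rows of three.  Same return value;
-- B also deletes the same first min(15, len) entries from its argument dict as A's pops do
-- (mutation is invisible in Lean; the equivalence proved here is about the return value).

-- ===== PORT A =====
-- inner `for j in range(0, 3)` of A; the `break` is modelled by skipping once `i + j >= stop`
-- holds (that condition is monotone in j, so skipping the rest equals breaking)
def pvAInner (titles : List String) (stop : Int) (i : Int)
    (st : String × PySem.Dict String String) : String × PySem.Dict String String :=
  (PySem.List.pyRange 0 3).foldl (fun st j =>
    if stop ≤ i + j then st
    else if titles.isEmpty then st
    else match st.2.pop? (PySem.List.pyGetD titles (i + j) "") with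
      | some (v, d') => (st.1 ++ v, d')
      | none => st      -- unreachable: the key is present (Python would raise KeyError)
    ) st

-- body of A's outer `for i in range(0, stop, 3)`
def pvAStep (titles : List String) (stop : Int)
    (st : String × PySem.Dict String String) (i : Int) : String × PySem.Dict String String :=
  let st1 := (st.1 ++ "<div class=\"container-row\">", st.2)
  let st2 := pvAInner titles stop i st1
  (st2.1 ++ "</div>", st2.2)

def get_image_from_dict (dict : List (String × String)) : String :=
  let d := PySem.Dict.ofList dict
  let ret : String := "<div class=\"content\">"
  let titles := d.keys
  let stop : Int := min 15 (titles.length : Int)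
  let st := (PySem.List.pyRange 0 stop 3).foldl (pvAStep titles stop) (ret, d)
  st.1 ++ "</div>"

-- ===== PORT B =====
-- (Source B also deletes the consumed keys from its argument dict; that mutation does not feed the
-- return value, which is built from `cells` alone, and is not represented in Lean)
def get_image_from_dict_alt (dict : List (String × String)) : String :=
  let d := PySem.Dict.ofList dict
  let cells := PySem.List.slice d.values none (some 15)
  let rows := (PySem.List.pyRange 0 (cells.length : Int) 3).map
      (fun i => PySem.Str.join "" (PySem.List.slice cells (some i) (some (i + 3))))
  "<div class=\"content\">"
    ++ PySem.Str.join "" (rows.map (fun r => "<div class=\"container-row\">" ++ r ++ "</div>"))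
    ++ "</div>"

-- ===== PRECONDITION & SPEC =====
def Spec_get_image_from_dict (dict : List (String × String)) (out : String) : Prop := out = get_image_from_dict_alt dict
instance (dict : List (String × String)) (out : String) : Decidable (Spec_get_image_from_dict dict out) := by unfold Spec_get_image_from_dict; infer_instance

-- ===== CLAIM (what is proved, stated in full; the proofs are below) =====
def Claim_equal_get_image_from_dict : Prop := ∀ (dict : List (String × String)), Dom_get_image_from_dict dict → Spec_get_image_from_dict dict (get_image_from_dict dict)

-- ===== LEMMAS AND PROOFS =====

-- common rendering both programs produce: the cell strings chunked into rows of three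
def pvRows3 : List String → List Char
  | [] => []
  | [a] => "<div class=\"container-row\">".toList ++ a.toList ++ "</div>".toList
  | [a, b] => "<div class=\"container-row\">".toList ++ a.toList ++ b.toList ++ "</div>".toList
  | a :: b :: c :: t => "<div class=\"container-row\">".toList ++ a.toList ++ b.toList ++ c.toList
      ++ "</div>".toList ++ pvRows3 t

lemma pvJoin_nil_flatten (xss : List (List Char)) : PySem.Chars.join [] xss = xss.flatten := by
  induction xss with
  | nil => simp [PySem.Chars.join_nil]
  | cons a t ih =>
    cases t with
    | nil => simp [PySem.Chars.join_singleton]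
    | cons b u => rw [PySem.Chars.join_cons_cons] at *; simp [ih]

lemma pvRange3_cons {a b : Int} (h : a < b) :
    PySem.List.pyRange a b 3 = a :: PySem.List.pyRange (a + 3) b 3 := by
  rw [@PySem.List.pyRange_of_pos a b 3 (by norm_num), @PySem.List.pyRange_of_pos (a+3) b 3 (by norm_num)]
  rw [if_pos h]
  have hn : ((b - a + 3 - 1) / 3).toNat = (if a + 3 < b then ((b - (a+3) + 3 - 1) / 3).toNat else 0) + 1 := by
    split_ifs with h3 <;> omega
  rw [hn, List.range_succ_eq_map]
  simp only [List.map_cons, List.map_map]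
  refine congrArg₂ _ (by ring) ?_
  apply List.map_congr_left; intro k _; simp [Function.comp]; push_cast; ring

lemma pvRangeNil {a b : Int} (h : b ≤ a) : PySem.List.pyRange a b 3 = [] := by
  rw [@PySem.List.pyRange_of_pos a b 3 (by norm_num), if_neg (by omega)]
  simp

lemma pvRange03 : PySem.List.pyRange 0 3 = [0, 1, 2] := by decide

-- popping the keys in insertion order returns the items in insertion order
lemma pvPopStep (L : List (String × String)) (hnd : (L.map Prod.fst).Nodup)
    (i : Nat) (p : String × String) (t : List (String × String)) (hd : L.drop i = p :: t) :
    (PySem.Dict.mk (L.drop i)).pop? (PySem.List.pyGetD (L.map Prod.fst) ((i : Nat) : Int) "")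
      = some (p.2, PySem.Dict.mk t) := by
  have hkey : PySem.List.pyGetD (L.map Prod.fst) ((i : Nat) : Int) "" = p.1 := by
    rw [PySem.List.pyGetD_natCast]
    have h0 : L[i]? = some p := by
      have := @List.getElem?_drop _ L i 0
      rw [hd] at this; simpa using this.symm
    simp [List.getD_eq_getElem?_getD, h0]
  have hnotin : p.1 ∉ t.map Prod.fst := by
    have hnd2 : ((L.drop i).map Prod.fst).Nodup := by
      rw [List.map_drop]; exact hnd.sublist (List.drop_sublist _ _)
    rw [hd, List.map_cons] at hnd2
    exact (List.nodup_cons.mp hnd2).1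
  obtain ⟨k, v⟩ := p
  rw [hkey, hd]
  simp only [PySem.Dict.pop?, PySem.Dict.get?_mk_cons, beq_self_eq_true, if_true,
    PySem.Dict.erase, List.filter_cons]
  simp only [beq_self_eq_true, Bool.not_true, Bool.false_eq_true, if_false,
    Option.map_some, Option.some.injEq, Prod.mk.injEq, true_and, PySem.Dict.mk.injEq]
  rw [List.filter_eq_self]
  intro a ha
  have hmem : a.1 ∈ t.map Prod.fst := List.mem_map_of_mem ha
  have hak : a.1 ≠ k := fun hae => hnotin (hae ▸ hmem)
  simp [hak]

-- A's outer loop, started at index i, renders the remaining cells in rows of three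
lemma pvA_loop (L : List (String × String)) (hnd : (L.map Prod.fst).Nodup)
    (stopN : Nat) (hstop : stopN ≤ L.length) :
    ∀ (fuel i : Nat), stopN ≤ i + 3 * fuel → ∀ (acc : String),
      (((PySem.List.pyRange (i : Int) (stopN : Int) 3).foldl
          (pvAStep (L.map Prod.fst) (stopN : Int)) (acc, PySem.Dict.mk (L.drop i))).1).toList
        = acc.toList ++ pvRows3 (((L.drop i).take (stopN - i)).map Prod.snd) := by
  intro fuel
  induction fuel with
  | zero =>
    intro i hle acc
    have h0 : stopN - i = 0 := by omega
    rw [pvRangeNil (by omega), h0]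
    simp [pvRows3]
  | succ fuel ih =>
    intro i hle acc
    by_cases hi : stopN ≤ i
    · have h0 : stopN - i = 0 := by omega
      rw [pvRangeNil (by omega), h0]; simp [pvRows3]
    push_neg at hi
    have hne : (L.map Prod.fst).isEmpty = false := by
      have h1 : 0 < L.length := by omega
      cases L with
      | nil => simp at h1
      | cons x xs => simp
    have hlen : i < L.length := by omega
    have hdI : L.drop i = L[i] :: L.drop (i + 1) := (List.getElem_cons_drop hlen).symm
    have P0 := pvPopStep L hnd i L[i] (L.drop (i+1)) hdI
    rw [pvRange3_cons (by omega), List.foldl_cons]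
    rcases Nat.lt_or_ge (i + 1) stopN with hi1 | hi1
    case _ =>  -- at least two pops in this row
      have hlen1 : i + 1 < L.length := by omega
      have hdI1 : L.drop (i+1) = L[i+1] :: L.drop (i + 2) := (List.getElem_cons_drop hlen1).symm
      have P1 := pvPopStep L hnd (i+1) L[i+1] (L.drop (i+2)) hdI1
      rw [show (((i+1 : Nat)) : Int) = (i : Int) + 1 by push_cast; ring] at P1
      rcases Nat.lt_or_ge (i + 2) stopN with hi2 | hi2
      case _ =>  -- a full row of three
        have hlen2 : i + 2 < L.length := by omega
        have hdI2 : L.drop (i+2) = L[i+2] :: L.drop (i + 3) := (List.getElem_cons_drop hlen2).symm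
        have P2 := pvPopStep L hnd (i+2) L[i+2] (L.drop (i+3)) hdI2
        rw [show (((i+2 : Nat)) : Int) = (i : Int) + 2 by push_cast; ring] at P2
        have c0 : ¬ ((stopN : Int) ≤ (i : Int)) := by omega
        have c1 : ¬ ((stopN : Int) ≤ (i : Int) + 1) := by omega
        have c2 : ¬ ((stopN : Int) ≤ (i : Int) + 2) := by omega
        have hstepped : pvAStep (L.map Prod.fst) (stopN : Int) (acc, PySem.Dict.mk (L.drop i)) (i : Int)
            = (acc ++ "<div class=\"container-row\">" ++ L[i].2 ++ L[i+1].2 ++ L[i+2].2 ++ "</div>",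
               PySem.Dict.mk (L.drop (i + 3))) := by
          simp only [pvAStep, pvAInner, pvRange03, List.foldl_cons, List.foldl_nil, hne,
            add_zero, c0, c1, c2, if_false, Bool.false_eq_true, P0, P1, P2]
        rw [hstepped]
        rw [show ((i : Int) + 3) = (((i + 3 : Nat)) : Int) by push_cast; ring]
        rw [ih (i+3) (by omega)]
        have htake : ((L.drop i).take (stopN - i)).map Prod.snd
            = L[i].2 :: L[i+1].2 :: L[i+2].2 :: ((L.drop (i+3)).take (stopN - (i+3))).map Prod.snd := by
          rw [hdI, hdI1, hdI2, show stopN - i = (stopN - (i+3)) + 3 by omega]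
          rfl
        rw [htake]
        simp [pvRows3]
      case _ =>  -- row of exactly two cells
        have c0 : ¬ ((stopN : Int) ≤ (i : Int)) := by omega
        have c1 : ¬ ((stopN : Int) ≤ (i : Int) + 1) := by omega
        have c2 : ((stopN : Int) ≤ (i : Int) + 2) := by omega
        have hstepped : pvAStep (L.map Prod.fst) (stopN : Int) (acc, PySem.Dict.mk (L.drop i)) (i : Int)
            = (acc ++ "<div class=\"container-row\">" ++ L[i].2 ++ L[i+1].2 ++ "</div>",
               PySem.Dict.mk (L.drop (i + 2))) := by
          simp only [pvAStep, pvAInner, pvRange03, List.foldl_cons, List.foldl_nil, hne,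
            add_zero, c0, c1, c2, if_true, if_false, Bool.false_eq_true, P0, P1]
        rw [hstepped, pvRangeNil (by omega)]
        have htake : ((L.drop i).take (stopN - i)).map Prod.snd = [L[i].2, L[i+1].2] := by
          rw [hdI, hdI1, show stopN - i = 2 by omega]
          rfl
        rw [List.foldl_nil, htake]
        simp [pvRows3]
    case _ =>  -- row of exactly one cell
      have c0 : ¬ ((stopN : Int) ≤ (i : Int)) := by omega
      have c1 : ((stopN : Int) ≤ (i : Int) + 1) := by omega
      have c2 : ((stopN : Int) ≤ (i : Int) + 2) := by omega
      have hstepped : pvAStep (L.map Prod.fst) (stopN : Int) (acc, PySem.Dict.mk (L.drop i)) (i : Int)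
          = (acc ++ "<div class=\"container-row\">" ++ L[i].2 ++ "</div>",
             PySem.Dict.mk (L.drop (i + 1))) := by
        simp only [pvAStep, pvAInner, pvRange03, List.foldl_cons, List.foldl_nil, hne,
          add_zero, c0, c1, c2, if_true, if_false, Bool.false_eq_true, P0]
      rw [hstepped, pvRangeNil (by omega)]
      have htake : ((L.drop i).take (stopN - i)).map Prod.snd = [L[i].2] := by
        rw [hdI, show stopN - i = 1 by omega]
        rfl
      rw [List.foldl_nil, htake]
      simp [pvRows3]

-- B's chunked comprehension, started at index i, renders the remaining cells in rows of three
lemma pvB_loop (cells : List String) :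
    ∀ (fuel i : Nat), cells.length ≤ i + 3 * fuel →
      ((PySem.List.pyRange (i : Int) (cells.length : Int) 3).map
        (fun x => ("<div class=\"container-row\">"
            ++ PySem.Str.join "" (PySem.List.slice cells (some x) (some (x + 3)))
            ++ "</div>").toList)).flatten
        = pvRows3 (cells.drop i) := by
  intro fuel
  induction fuel with
  | zero =>
    intro i hle
    rw [pvRangeNil (by omega), List.drop_eq_nil_of_le (by omega)]
    simp [pvRows3]
  | succ fuel ih =>
    intro i hle
    by_cases hi : cells.length ≤ i
    · rw [pvRangeNil (by omega), List.drop_eq_nil_of_le (by omega)]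
      simp [pvRows3]
    push_neg at hi
    rw [pvRange3_cons (by omega), List.map_cons, List.flatten_cons]
    rw [show ((i : Int) + 3) = ((i : Int) + ((3 : Nat) : Int)) by norm_num,
        PySem.List.slice_natCast_add]
    rw [show ((i : Int) + ((3 : Nat) : Int)) = (((i + 3 : Nat)) : Int) by push_cast; ring]
    rw [ih (i + 3) (by omega)]
    rw [show cells.drop (i + 3) = (cells.drop i).drop 3 by rw [List.drop_drop, Nat.add_comm]]
    simp only [String.toList_append, PySem.Str.toList_join]
    rcases hd : cells.drop i with _ | ⟨a, _ | ⟨b, _ | ⟨c, t⟩⟩⟩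
    · exact absurd (by simpa using congrArg List.length hd) (by omega)
    all_goals simp [hd, pvRows3, pvJoin_nil_flatten]

lemma pvA_render (dict : List (String × String)) :
    (get_image_from_dict dict).toList
      = "<div class=\"content\">".toList
        ++ pvRows3 (((PySem.Dict.ofList dict).items.take 15).map Prod.snd)
        ++ "</div>".toList := by
  unfold get_image_from_dict
  dsimp only
  set L := (PySem.Dict.ofList dict).items with hL
  have hkeys : (PySem.Dict.ofList dict).keys = L.map Prod.fst := rfl
  have hnd : (L.map Prod.fst).Nodup := by
    have := PySem.Dict.nodup_keys_ofList dict
    rwa [hkeys] at this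
  have hd : PySem.Dict.ofList dict = PySem.Dict.mk L := rfl
  set stopN : Nat := min 15 L.length with hs
  have hcast : (min 15 ((L.map Prod.fst).length : Int)) = ((stopN : Nat) : Int) := by
    simp [hs]
  have hloop := pvA_loop L hnd stopN (by omega) 5 0 (by omega) "<div class=\"content\">"
  simp only [Nat.cast_zero, List.drop_zero] at hloop
  rw [hkeys, hcast, hd]
  rw [String.toList_append, hloop, Nat.sub_zero]
  rw [show L.take stopN = L.take 15 from by rw [hs, ← List.take_take, List.take_length]]

lemma pvB_render (dict : List (String × String)) :
    (get_image_from_dict_alt dict).toList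
      = "<div class=\"content\">".toList
        ++ pvRows3 (((PySem.Dict.ofList dict).items.take 15).map Prod.snd)
        ++ "</div>".toList := by
  unfold get_image_from_dict_alt
  dsimp only
  set L := (PySem.Dict.ofList dict).items with hL
  have hvals : (PySem.Dict.ofList dict).values = L.map Prod.snd := rfl
  rw [hvals]
  rw [show (15 : Int) = ((15 : Nat) : Int) from by norm_num, PySem.List.slice_to_natCast]
  rw [← List.map_take]
  set cells := (L.take 15).map Prod.snd with hc
  have hloop := pvB_loop cells 5 0 (by simp [hc])
  simp only [Nat.cast_zero, List.drop_zero] at hloop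
  simp only [String.toList_append, PySem.Str.toList_join, List.map_map,
    show ("" : String).toList = [] from rfl, pvJoin_nil_flatten]
  rw [← hloop]
  rfl

-- ===== VERDICT (by name: the statement is the Claim_ definition above) =====
theorem get_image_from_dict_spec : Claim_equal_get_image_from_dict := by
  intro dict _
  unfold Spec_get_image_from_dict
  apply String.toList_inj.mp
  rw [pvA_render, pvB_render]
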